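-- pv_equiv track=rewrite | github.com/linduix/Bot_Flight_5 | pyfiles/geneticFuncs.py | dependencies
-- ===== SOURCE A (Python) =====
-- def dependencies(connections: dict, node: int, memo=None) -> set[int]:
--     if memo is None:
--         memo: dict[int:set] = dict()
--
--     deps = set()
--     for inp, outp in connections.keys():
--         if outp == node:
--             # check memo for dependencies
--             if inp in memo:
--                 deps.update(memo[inp])
--                 deps.add(inp)
--             else:
--                 deps.add(inp)
--                 deps.update(dependencies(connections, inp))
--
--     memo[node] = deps
--     return deps
-- ===== SOURCE B (Python) =====
-- def dependencies(connections: dict, node: int, memo=None) -> set[int]: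
--     if memo is None:
--         memo = dict()
--
--     # reverse adjacency built once: outp -> [inp, ...] in key order
--     rev = {}
--     for inp, outp in connections.keys():
--         rev.setdefault(outp, []).append(inp)
--
--     deps = set()
--     done = set()  # nodes whose whole predecessor closure is already in deps
--
--     def visit(n):
--         for p in rev.get(n, []):
--             deps.add(p)
--             if p not in done:
--                 done.add(p)
--                 visit(p)
--
--     for p in rev.get(node, []):
--         if p in memo:
--             deps.update(memo[p])
--             deps.add(p)
--         else:
--             deps.add(p)
--             if p not in done:
--                 done.add(p)
--                 visit(p)
--
--     memo[node] = deps
--     return deps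
-- ===== Notes on version B (the rewrite author's own statement) =====
-- stated objective: alternative
-- what changed: A re-expands every predecessor's full closure by a fresh recursion for each incoming edge (its memo is never passed down, so nothing is reused); B builds a reverse adjacency dict once and runs a single DFS with a visited ('done') set, expanding each node at most once.
import Mathlib
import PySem

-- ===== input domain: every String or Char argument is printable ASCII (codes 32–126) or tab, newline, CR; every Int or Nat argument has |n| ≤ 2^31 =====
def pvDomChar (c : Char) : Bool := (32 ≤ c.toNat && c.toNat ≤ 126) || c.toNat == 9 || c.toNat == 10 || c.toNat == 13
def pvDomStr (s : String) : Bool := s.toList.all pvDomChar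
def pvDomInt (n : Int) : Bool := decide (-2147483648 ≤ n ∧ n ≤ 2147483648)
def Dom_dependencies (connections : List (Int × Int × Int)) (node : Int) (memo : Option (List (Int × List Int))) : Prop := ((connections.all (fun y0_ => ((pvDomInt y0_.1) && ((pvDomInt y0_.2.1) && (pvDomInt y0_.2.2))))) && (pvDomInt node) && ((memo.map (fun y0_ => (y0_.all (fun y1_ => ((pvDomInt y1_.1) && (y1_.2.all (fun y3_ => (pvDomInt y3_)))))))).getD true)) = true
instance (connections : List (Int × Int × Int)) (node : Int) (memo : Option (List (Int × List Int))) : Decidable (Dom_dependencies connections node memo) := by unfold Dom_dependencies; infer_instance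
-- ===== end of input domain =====

-- B replaces A's repeated re-expansion of every predecessor's closure (fresh recursion, unused memo)
-- by one reverse-adjacency index plus a single DFS with a visited set; equivalence is about the
-- RETURN value (both Pythons also write memo[node], identically).

-- ===== PORT A =====
-- A's inner recursive call 'dependencies(connections, inp)' (memo=None, i.e. empty memo); fueled
-- for totality — Pre_dependencies guarantees the fuel 'connections.length' is never exhausted.
def depsRec (conns : List (Int × Int × Int)) : Nat → Int → PySem.Set Int
  | 0, _ => []
  | k+1, node => conns.foldl (fun deps t =>
      if t.2.1 == node then
        PySem.Set.update (PySem.Set.add deps t.1) (depsRec conns k t.1)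
      else deps) []

def dependencies (connections : List (Int × Int × Int)) (node : Int) (memo : Option (List (Int × List Int))) : List Int :=
  let m : PySem.Dict Int (List Int) := PySem.Dict.mk (memo.getD [])
  connections.foldl (fun deps t =>
    if t.2.1 == node then
      match PySem.Dict.get? m t.1 with
      | some v => PySem.Set.add (PySem.Set.update deps v) t.1
      | none => PySem.Set.update (PySem.Set.add deps t.1) (depsRec connections connections.length t.1)
    else deps) []

-- ===== PORT B =====
-- rev.setdefault(outp, []).append(inp)
def buildRev (conns : List (Int × Int × Int)) : PySem.Dict Int (List Int) :=
  conns.foldl (fun d t => d.insert t.2.1 (d.getD t.2.1 [] ++ [t.1])) PySem.Dict.empty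

-- the nested 'visit': mark done, then recurse; fueled for totality (fuel is never
-- exhausted: a node is expanded at most once per branch before hitting 'done')
def visitB (rev : PySem.Dict Int (List Int)) : Nat → Int → PySem.Set Int × PySem.Set Int → PySem.Set Int × PySem.Set Int
  | 0, _, st => st
  | k+1, n, st => (rev.getD n []).foldl (fun st p =>
      let out := PySem.Set.add st.1 p
      if PySem.Set.contains st.2 p then (out, st.2)
      else visitB rev k p (out, PySem.Set.add st.2 p)) st

def dependencies_alt (connections : List (Int × Int × Int)) (node : Int) (memo : Option (List (Int × List Int))) : List Int :=
  let m : PySem.Dict Int (List Int) := PySem.Dict.mk (memo.getD [])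
  let rev := buildRev connections
  let st := (rev.getD node []).foldl (fun (st : PySem.Set Int × PySem.Set Int) p =>
      match PySem.Dict.get? m p with
      | some v => (PySem.Set.add (PySem.Set.update st.1 v) p, st.2)
      | none =>
        let out := PySem.Set.add st.1 p
        if PySem.Set.contains st.2 p then (out, st.2)
        else visitB rev connections.length p (out, PySem.Set.add st.2 p)) (([], []) : PySem.Set Int × PySem.Set Int)
  st.1

-- ===== PRECONDITION & SPEC =====
-- direct predecessors of n, in connection order (a property of the input graph, not of either port)
def predsL (conns : List (Int × Int × Int)) (n : Int) : List Int :=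
  (conns.filter (fun t => t.2.1 == n)).map (fun t => t.1)

-- 'every predecessor chain starting at n has at most k edges'
def bndB (conns : List (Int × Int × Int)) : Nat → Int → Bool
  | 0, n => (predsL conns n).isEmpty
  | k+1, n => (predsL conns n).all (bndB conns k)

-- Pre_ excludes exactly the inputs on which Python A raises RecursionError: some non-memoized
-- direct predecessor of node starts a predecessor chain longer than |connections| (i.e. the
-- reverse graph has a cycle reachable there, so A's unmemoized recursion never terminates).
def Pre_dependencies (connections : List (Int × Int × Int)) (node : Int) (memo : Option (List (Int × List Int))) : Prop :=
  ∀ p ∈ predsL connections node,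
    PySem.Dict.get? (PySem.Dict.mk (memo.getD [])) p = none →
    bndB connections connections.length p = true
instance (connections : List (Int × Int × Int)) (node : Int) (memo : Option (List (Int × List Int))) : Decidable (Pre_dependencies connections node memo) := by unfold Pre_dependencies; infer_instance

def pvWitness_dependencies : (List (Int × Int × Int)) × Int × (Option (List (Int × List Int))) :=
  ([(1, 2, 5), (2, 3, 1)], 3, none)

def Spec_dependencies (connections : List (Int × Int × Int)) (node : Int) (memo : Option (List (Int × List Int))) (out : List Int) : Prop := out = dependencies_alt connections node memo
instance (connections : List (Int × Int × Int)) (node : Int) (memo : Option (List (Int × List Int))) (out : List Int) : Decidable (Spec_dependencies connections node memo out) := by unfold Spec_dependencies; infer_instance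

-- ===== CLAIM (what is proved, stated in full; the proofs are below) =====
def Claim_equal_dependencies : Prop := ∀ (connections : List (Int × Int × Int)) (node : Int) (memo : Option (List (Int × List Int))), Dom_dependencies connections node memo → Pre_dependencies connections node memo → Spec_dependencies connections node memo (dependencies connections node memo)

-- ===== LEMMAS AND PROOFS =====

-- the (possibly repetitive) stream of predecessors A's recursion walks, depth-truncated at k
def stream (conns : List (Int × Int × Int)) : Nat → Int → List Int
  | 0, _ => []
  | k+1, n => (predsL conns n).flatMap (fun i => i :: stream conns k i)

-- y is a (transitive, ≥ 1 step) predecessor of n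
inductive Reaches (conns : List (Int × Int × Int)) : Int → Int → Prop
  | step {n i : Int} : i ∈ predsL conns n → Reaches conns n i
  | cons {n i z : Int} : i ∈ predsL conns n → Reaches conns i z → Reaches conns n z

theorem reaches_trans {conns : List (Int × Int × Int)} {x y z : Int}
    (h1 : Reaches conns x y) (h2 : Reaches conns y z) : Reaches conns x z := by
  induction h1 with
  | step h => exact Reaches.cons h h2
  | cons h _ ih => exact Reaches.cons h (ih h2)

theorem mem_stream_reaches {conns : List (Int × Int × Int)} :
    ∀ {k : Nat} {n y : Int}, y ∈ stream conns k n → Reaches conns n y := by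
  intro k
  induction k with
  | zero => intro n y h; simp [stream] at h
  | succ k ih =>
    intro n y h
    simp only [stream, List.mem_flatMap, List.mem_cons] at h
    obtain ⟨i, hi, h⟩ := h
    rcases h with rfl | h
    · exact Reaches.step hi
    · exact Reaches.cons hi (ih h)

theorem reaches_mem_stream {conns : List (Int × Int × Int)} {n y : Int}
    (h : Reaches conns n y) : ∀ {k : Nat}, bndB conns k n = true → y ∈ stream conns k n := by
  induction h with
  | @step n i hi =>
    intro k hb
    match k with
    | 0 => simp [bndB, List.isEmpty_iff] at hb; simp [hb] at hi
    | k+1 =>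
      simp only [stream, List.mem_flatMap]
      exact ⟨i, hi, by simp⟩
  | @cons n i z hi _ ih =>
    intro k hb
    match k with
    | 0 => simp [bndB, List.isEmpty_iff] at hb; simp [hb] at hi
    | k+1 =>
      simp only [bndB, List.all_eq_true] at hb
      simp only [stream, List.mem_flatMap]
      exact ⟨i, hi, List.mem_cons_of_mem _ (ih (hb i hi))⟩

theorem reaches_descend {conns : List (Int × Int × Int)} {n y : Int}
    (h : Reaches conns n y) : ∀ {k : Nat}, bndB conns k n = true → ∃ j < k, bndB conns j y = true := by
  induction h with
  | @step n i hi =>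
    intro k hb
    match k with
    | 0 => simp [bndB, List.isEmpty_iff] at hb; simp [hb] at hi
    | k+1 =>
      simp only [bndB, List.all_eq_true] at hb
      exact ⟨k, Nat.lt_succ_self k, hb i hi⟩
  | @cons n i z hi _ ih =>
    intro k hb
    match k with
    | 0 => simp [bndB, List.isEmpty_iff] at hb; simp [hb] at hi
    | k+1 =>
      simp only [bndB, List.all_eq_true] at hb
      obtain ⟨j, hj, hbj⟩ := ih (hb i hi)
      exact ⟨j, Nat.lt_trans hj (Nat.lt_succ_self k), hbj⟩

theorem bnd_not_reaches_self {conns : List (Int × Int × Int)} :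
    ∀ (k : Nat) (n : Int), bndB conns k n = true → ¬ Reaches conns n n := by
  intro k
  induction k using Nat.strong_induction_on with
  | _ k ih =>
    intro n hb hr
    obtain ⟨j, hj, hbj⟩ := reaches_descend hr hb
    exact ih j hj n hbj hr

-- Set helper facts specific to these programs
theorem update_of_subset (s l : PySem.Set Int) : (∀ y ∈ l, y ∈ s) → PySem.Set.update s l = s := by
  induction l generalizing s with
  | nil => intro _; rfl
  | cons a l ih =>
    intro h
    rw [PySem.Set.update_cons, PySem.Set.add_of_mem (h a List.mem_cons_self)]
    exact ih s (fun y hy => h y (List.mem_cons_of_mem _ hy))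

theorem update_ofList_right (s : PySem.Set Int) (xs : List Int) :
    PySem.Set.update s (PySem.Set.ofList xs) = PySem.Set.update s xs := by
  rw [PySem.Set.update_eq_append_filter, PySem.Set.update_eq_append_filter, PySem.Set.ofList_ofList]

theorem mem_update_left {s : PySem.Set Int} {l : List Int} {y : Int} (h : y ∈ s) :
    y ∈ PySem.Set.update s l := (PySem.Set.mem_update _ _ _).2 (Or.inl h)

-- A's fold over 'connections' with 'if outp == n' is a fold over the predecessor list
theorem foldl_filter_preds {β : Type} (conns : List (Int × Int × Int)) (n : Int)
    (g : β → Int → β) (init : β) :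
    conns.foldl (fun d t => if t.2.1 == n then g d t.1 else d) init
      = (predsL conns n).foldl g init := by
  induction conns generalizing init with
  | nil => rfl
  | cons t rest ih =>
    by_cases h : (t.2.1 == n) = true
    · rw [List.foldl_cons, if_pos h, ih]
      simp [predsL, h]
    · rw [List.foldl_cons, if_neg (by simp [h]), ih]
      simp [predsL, h]

-- depsRec computes the de-duplicated stream
theorem depsRec_eq_ofList_stream (conns : List (Int × Int × Int)) :
    ∀ (k : Nat) (n : Int), depsRec conns k n = PySem.Set.ofList (stream conns k n) := by
  intro k
  induction k with
  | zero => intro n; rfl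
  | succ k ih =>
    intro n
    have gen : ∀ (ps : List Int) (d : PySem.Set Int),
        ps.foldl (fun d i => PySem.Set.update (PySem.Set.add d i) (depsRec conns k i)) d
          = PySem.Set.update d (ps.flatMap (fun i => i :: stream conns k i)) := by
      intro ps
      induction ps with
      | nil => intro d; simp [PySem.Set.update_nil]
      | cons i ps ihp =>
        intro d
        have h1 : PySem.Set.update (PySem.Set.add d i) (depsRec conns k i)
            = PySem.Set.update d (i :: stream conns k i) := by
          rw [ih, update_ofList_right, PySem.Set.update_cons]
        simp only [List.foldl_cons, h1, ihp, List.flatMap_cons]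
        rw [← PySem.Set.update_append]
    show conns.foldl _ [] = _
    rw [foldl_filter_preds conns n
      (fun d i => PySem.Set.update (PySem.Set.add d i) (depsRec conns k i)) [], gen]
    rfl

theorem update_stream_of_depsRec (conns : List (Int × Int × Int)) (k : Nat) (n : Int)
    (d : PySem.Set Int) :
    PySem.Set.update d (depsRec conns k n) = PySem.Set.update d (stream conns k n) := by
  rw [depsRec_eq_ofList_stream, update_ofList_right]

-- the reverse-adjacency dict read back gives exactly the predecessor lists
theorem buildRev_getD (conns : List (Int × Int × Int)) (n : Int) :
    (buildRev conns).getD n [] = predsL conns n := by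
  have gen : ∀ (cs : List (Int × Int × Int)) (d : PySem.Dict Int (List Int)),
      (cs.foldl (fun d t => d.insert t.2.1 (d.getD t.2.1 [] ++ [t.1])) d).getD n []
        = d.getD n [] ++ predsL cs n := by
    intro cs
    induction cs with
    | nil => intro d; simp [predsL]
    | cons t rest ih =>
      intro d
      rw [List.foldl_cons, ih]
      by_cases h : n = t.2.1
      · subst h
        simp [predsL]
      · have h2 : ¬ t.2.1 = n := fun he => h he.symm
        simp [PySem.Dict.getD_insert, h, predsL, h2]
  have := gen conns PySem.Dict.empty
  simpa [buildRev, predsL] using this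

-- invariant: every 'done' node is either still in progress (on the path π) or its whole
-- predecessor closure is already emitted
def INVB (conns : List (Int × Int × Int)) (done out : PySem.Set Int) (π : List Int) : Prop :=
  ∀ x ∈ done, x ∈ π ∨ (x ∈ out ∧ ∀ y, Reaches conns x y → y ∈ out)

theorem INVB_mono_out {conns : List (Int × Int × Int)} {done out out' : PySem.Set Int} {π : List Int}
    (h : INVB conns done out π) (hsub : ∀ y ∈ out, y ∈ out') : INVB conns done out' π := by
  intro x hx
  rcases h x hx with hπ | ⟨h1, h2⟩
  · exact Or.inl hπ
  · exact Or.inr ⟨hsub x h1, fun y hy => hsub y (h2 y hy)⟩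

-- main correspondence: 'visit' emits exactly A's (de-duplicated) stream
theorem visitB_spec (conns : List (Int × Int × Int)) :
    ∀ (k : Nat) (n : Int) (out done : PySem.Set Int) (π : List Int),
      bndB conns k n = true →
      INVB conns done out π →
      (∀ x ∈ π, x = n ∨ Reaches conns x n) →
      (∀ x ∈ π, ¬ Reaches conns x x) →
      (visitB (buildRev conns) k n (out, done)).1 = PySem.Set.update out (stream conns k n) ∧
      INVB conns (visitB (buildRev conns) k n (out, done)).2 (visitB (buildRev conns) k n (out, done)).1 π := by
  intro k
  induction k with
  | zero =>
    intro n out done π _ hinv _ _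
    exact ⟨by simp [visitB, stream, PySem.Set.update_nil], hinv⟩
  | succ k ih =>
    intro n out done π hb hinv h3 h4
    simp only [bndB, List.all_eq_true] at hb
    have fold : ∀ (ps : List Int) (out done : PySem.Set Int),
        (∀ p ∈ ps, bndB conns k p = true ∧ Reaches conns n p) →
        INVB conns done out π →
        (ps.foldl (fun st p =>
            let o := PySem.Set.add st.1 p
            if PySem.Set.contains st.2 p then (o, st.2)
            else visitB (buildRev conns) k p (o, PySem.Set.add st.2 p)) (out, done)).1
          = PySem.Set.update out (ps.flatMap (fun i => i :: stream conns k i)) ∧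
        INVB conns (ps.foldl (fun st p =>
            let o := PySem.Set.add st.1 p
            if PySem.Set.contains st.2 p then (o, st.2)
            else visitB (buildRev conns) k p (o, PySem.Set.add st.2 p)) (out, done)).2
          (ps.foldl (fun st p =>
            let o := PySem.Set.add st.1 p
            if PySem.Set.contains st.2 p then (o, st.2)
            else visitB (buildRev conns) k p (o, PySem.Set.add st.2 p)) (out, done)).1 π := by
      intro ps
      induction ps with
      | nil =>
        intro out done _ hinv'
        exact ⟨by simp [PySem.Set.update_nil], hinv'⟩
      | cons p ps ihp =>
        intro out done hps hinv'
        obtain ⟨hbp, hnp⟩ := hps p (List.mem_cons_self)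
        have hnotπ : p ∉ π := by
          intro hpπ
          rcases h3 p hpπ with rfl | hpn
          · exact h4 p hpπ hnp
          · exact h4 p hpπ (reaches_trans hpn hnp)
        simp only [List.foldl_cons, List.flatMap_cons]
        by_cases hc : PySem.Set.contains done p = true
        · -- p already fully expanded: A's whole sub-stream is already present
          have hpd : p ∈ done := (PySem.Set.contains_iff _ _).1 hc
          rcases hinv' p hpd with hπ | ⟨hpo, hclo⟩
          · exact absurd hπ hnotπ
          have hsub : ∀ y ∈ stream conns k p, y ∈ PySem.Set.add out p := by
            intro y hy
            exact (PySem.Set.mem_add _ _ _).2 (Or.inl (hclo y (mem_stream_reaches hy)))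
          have hstep : PySem.Set.update out (p :: stream conns k p) = PySem.Set.add out p := by
            rw [PySem.Set.update_cons, update_of_subset _ _ hsub]
          simp only [hc, if_pos]
          obtain ⟨e1, e2⟩ := ihp (PySem.Set.add out p) done
            (fun q hq => hps q (List.mem_cons_of_mem _ hq))
            (INVB_mono_out hinv' (fun y hy => (PySem.Set.mem_add _ _ _).2 (Or.inl hy)))
          refine ⟨?_, e2⟩
          rw [e1, ← hstep, ← PySem.Set.update_append, List.cons_append]
        · -- p is new: recurse; its closure becomes fully emitted
          simp only [hc, if_neg, Bool.not_eq_true]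
          have hnps : ¬ Reaches conns p p := bnd_not_reaches_self k p hbp
          have hinvrec : INVB conns (PySem.Set.add done p) (PySem.Set.add out p) (p :: π) := by
            intro x hx
            rcases (PySem.Set.mem_add _ _ _).1 hx with hx | rfl
            · rcases hinv' x hx with hπ | ⟨h1, h2⟩
              · exact Or.inl (List.mem_cons_of_mem _ hπ)
              · exact Or.inr ⟨(PySem.Set.mem_add _ _ _).2 (Or.inl h1),
                  fun y hy => (PySem.Set.mem_add _ _ _).2 (Or.inl (h2 y hy))⟩
            · exact Or.inl List.mem_cons_self
          have h3' : ∀ x ∈ p :: π, x = p ∨ Reaches conns x p := by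
            intro x hx
            rcases List.mem_cons.1 hx with rfl | hx
            · exact Or.inl rfl
            · rcases h3 x hx with rfl | hxn
              · exact Or.inr hnp
              · exact Or.inr (reaches_trans hxn hnp)
          have h4' : ∀ x ∈ p :: π, ¬ Reaches conns x x := by
            intro x hx
            rcases List.mem_cons.1 hx with rfl | hx
            · exact hnps
            · exact h4 x hx
          obtain ⟨v1, v2⟩ := ih p (PySem.Set.add out p) (PySem.Set.add done p) (p :: π)
            hbp hinvrec h3' h4'
          set v := visitB (buildRev conns) k p (PySem.Set.add out p, PySem.Set.add done p) with hv
          -- after the call p's closure is emitted, so INVB holds again for the shorter path π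
          have hinv2 : INVB conns v.2 v.1 π := by
            intro x hx
            rcases v2 x hx with hπ' | hgood
            · rcases List.mem_cons.1 hπ' with rfl | hπ
              · refine Or.inr ⟨?_, ?_⟩
                · rw [v1]; exact mem_update_left ((PySem.Set.mem_add _ _ _).2 (Or.inr rfl))
                · intro y hy
                  rw [v1]
                  exact (PySem.Set.mem_update _ _ _).2 (Or.inr (reaches_mem_stream hy hbp))
              · exact Or.inl hπ
            · exact Or.inr hgood
          obtain ⟨e1, e2⟩ := ihp v.1 v.2 (fun q hq => hps q (List.mem_cons_of_mem _ hq)) hinv2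
          refine ⟨?_, e2⟩
          rw [e1, v1, ← PySem.Set.update_cons, ← PySem.Set.update_append, List.cons_append]
    have hps : ∀ p ∈ predsL conns n, bndB conns k p = true ∧ Reaches conns n p :=
      fun p hp => ⟨hb p hp, Reaches.step hp⟩
    have := fold (predsL conns n) out done hps hinv
    simpa [visitB, buildRev_getD, stream] using this

-- ===== VERDICT helpers: the two top-level folds agree =====
theorem dependencies_eq (connections : List (Int × Int × Int)) (node : Int)
    (memo : Option (List (Int × List Int)))
    (hpre : Pre_dependencies connections node memo) :
    dependencies connections node memo = dependencies_alt connections node memo := by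
  unfold dependencies dependencies_alt
  set m : PySem.Dict Int (List Int) := PySem.Dict.mk (memo.getD []) with hm
  set K := connections.length with hK
  rw [foldl_filter_preds connections node (fun deps i =>
      match PySem.Dict.get? m i with
      | some v => PySem.Set.add (PySem.Set.update deps v) i
      | none => PySem.Set.update (PySem.Set.add deps i) (depsRec connections K i)) []]
  dsimp only
  rw [buildRev_getD]
  have fold : ∀ (ps : List Int) (out done : PySem.Set Int),
      (∀ p ∈ ps, PySem.Dict.get? m p = none → bndB connections K p = true) →
      INVB connections done out [] →
      ps.foldl (fun deps i =>
        match PySem.Dict.get? m i with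
        | some v => PySem.Set.add (PySem.Set.update deps v) i
        | none => PySem.Set.update (PySem.Set.add deps i) (depsRec connections K i)) out
      = (ps.foldl (fun st p =>
          match PySem.Dict.get? m p with
          | some v => (PySem.Set.add (PySem.Set.update st.1 v) p, st.2)
          | none =>
            let o := PySem.Set.add st.1 p
            if PySem.Set.contains st.2 p then (o, st.2)
            else visitB (buildRev connections) K p (o, PySem.Set.add st.2 p)) (out, done)).1 := by
    intro ps
    induction ps with
    | nil => intro out done _ _; rfl
    | cons p ps ihp =>
      intro out done hps hinv
      simp only [List.foldl_cons]
      cases hg : PySem.Dict.get? m p with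
      | some v =>
        exact ihp (PySem.Set.add (PySem.Set.update out v) p) done
          (fun q hq => hps q (List.mem_cons_of_mem _ hq))
          (INVB_mono_out hinv (fun y hy =>
            (PySem.Set.mem_add _ _ _).2 (Or.inl (mem_update_left hy))))
      | none =>
        have hbp : bndB connections K p = true := hps p List.mem_cons_self hg
        simp only
        by_cases hc : PySem.Set.contains done p = true
        · have hpd : p ∈ done := (PySem.Set.contains_iff _ _).1 hc
          rcases hinv p hpd with hπ | ⟨hpo, hclo⟩
          · simp at hπ
          have hstep : PySem.Set.update (PySem.Set.add out p) (depsRec connections K p)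
              = PySem.Set.add out p := by
            rw [update_stream_of_depsRec]
            exact update_of_subset _ _ (fun y hy =>
              (PySem.Set.mem_add _ _ _).2 (Or.inl (hclo y (mem_stream_reaches hy))))
          simp only [hc, if_pos, hstep]
          exact ihp (PySem.Set.add out p) done
            (fun q hq => hps q (List.mem_cons_of_mem _ hq))
            (INVB_mono_out hinv (fun y hy => (PySem.Set.mem_add _ _ _).2 (Or.inl hy)))
        · simp only [hc, if_neg, Bool.not_eq_true]
          have hnps : ¬ Reaches connections p p := bnd_not_reaches_self K p hbp
          have hinvrec : INVB connections (PySem.Set.add done p) (PySem.Set.add out p) [p] := by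
            intro x hx
            rcases (PySem.Set.mem_add _ _ _).1 hx with hx | rfl
            · rcases hinv x hx with hπ | ⟨h1, h2⟩
              · simp at hπ
              · exact Or.inr ⟨(PySem.Set.mem_add _ _ _).2 (Or.inl h1),
                  fun y hy => (PySem.Set.mem_add _ _ _).2 (Or.inl (h2 y hy))⟩
            · exact Or.inl List.mem_cons_self
          obtain ⟨v1, v2⟩ := visitB_spec connections K p (PySem.Set.add out p)
            (PySem.Set.add done p) [p] hbp hinvrec
            (fun x hx => by simp only [List.mem_singleton] at hx; exact Or.inl hx)
            (fun x hx => by simp only [List.mem_singleton] at hx; subst hx; exact hnps)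
          set v := visitB (buildRev connections) K p (PySem.Set.add out p, PySem.Set.add done p) with hv
          have hinv2 : INVB connections v.2 v.1 [] := by
            intro x hx
            rcases v2 x hx with hπ' | hgood
            · rcases List.mem_cons.1 hπ' with rfl | hπ
              · refine Or.inr ⟨?_, ?_⟩
                · rw [v1]; exact mem_update_left ((PySem.Set.mem_add _ _ _).2 (Or.inr rfl))
                · intro y hy
                  rw [v1]
                  exact (PySem.Set.mem_update _ _ _).2 (Or.inr (reaches_mem_stream hy hbp))
              · simp at hπ
            · exact Or.inr hgood
          have hAstep : PySem.Set.update (PySem.Set.add out p) (depsRec connections K p) = v.1 := by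
            rw [update_stream_of_depsRec, v1]
          rw [hAstep]
          exact ihp v.1 v.2 (fun q hq => hps q (List.mem_cons_of_mem _ hq)) hinv2
  exact fold (predsL connections node) [] []
    (fun p hp hg => hpre p hp hg)
    (fun x hx => by simp at hx)

-- ===== VERDICT (by name: the statement is the Claim_ definition above) =====
theorem dependencies_spec : Claim_equal_dependencies := by
  intro connections node memo _ hpre
  unfold Spec_dependencies
  exact dependencies_eq connections node memo hpre
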